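-- pv_equiv track=rewrite | github.com/stanfordnmbl/marker-enhancer | utilities.py | getMarkersPoseDetector_feet
-- ===== SOURCE A (Python) =====
-- def getArmMarkersPoseDetector(pose_detector):
--     markers = ['RElbow', 'LElbow', 'RWrist', 'LWrist']
--     markers = [m + "_" + pose_detector for m in markers]
--
--     return markers
--
-- def getMarkersPoseDetector(pose_detector, withArms=True):
--     markers = ['Neck', 'RShoulder', 'LShoulder', 'RHip', 'LHip', 'midHip',
--                'RKnee', 'LKnee', 'RAnkle', 'LAnkle', 'RHeel', 'LHeel',
--                'RSmallToe', 'LSmallToe', 'RBigToe', 'LBigToe', 'RElbow',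
--                'LElbow', 'RWrist', 'LWrist']
--     markers = [m + "_" + pose_detector for m in markers]
--
--     if not withArms:
--         armMarkers = getArmMarkersPoseDetector(pose_detector)
--         # Remove the arm markers from markers
--         markers = [m for m in markers if m not in armMarkers]
--
--     return markers
--
-- def getMarkersPoseDetector_feet(pose_detector, withArms=True):
--
--     markers = [
--         "RAnkle", "LAnkle", "RHeel", "LHeel", "RSmallToe", "LSmallToe",
--         "RBigToe", "LBigToe"]
--     markers = [m + "_" + pose_detector for m in markers]
--
--     allMarkers = getMarkersPoseDetector(pose_detector, withArms)
--
--     idx_in_allMarkers = []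
--     for marker in markers:
--         idx_in_allMarkers.append(allMarkers.index(marker))
--
--     return markers, idx_in_allMarkers
-- ===== SOURCE B (Python) =====
-- def getArmMarkersPoseDetector(pose_detector):
--     markers = ['RElbow', 'LElbow', 'RWrist', 'LWrist']
--     markers = [m + "_" + pose_detector for m in markers]
--
--     return markers
--
--
-- def getMarkersPoseDetector(pose_detector, withArms=True):
--     markers = ['Neck', 'RShoulder', 'LShoulder', 'RHip', 'LHip', 'midHip',
--                'RKnee', 'LKnee', 'RAnkle', 'LAnkle', 'RHeel', 'LHeel',
--                'RSmallToe', 'LSmallToe', 'RBigToe', 'LBigToe', 'RElbow',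
--                'LElbow', 'RWrist', 'LWrist']
--     markers = [m + "_" + pose_detector for m in markers]
--
--     if not withArms:
--         armMarkers = getArmMarkersPoseDetector(pose_detector)
--         markers = [m for m in markers if m not in armMarkers]
--
--     return markers
--
--
-- def getMarkersPoseDetector_feet(pose_detector, withArms=True):
--     # The feet markers occur in allMarkers in the same order as the feet name
--     # list, so one enumerate pass over allMarkers yields both the marker names
--     # and their indices; no per-marker .index() scans and no separate
--     # construction of the returned name list.
--     feet = {b + "_" + pose_detector for b in (
--         "RAnkle", "LAnkle", "RHeel", "LHeel", "RSmallToe", "LSmallToe",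
--         "RBigToe", "LBigToe")}
--
--     allMarkers = getMarkersPoseDetector(pose_detector, withArms)
--
--     markers = []
--     idx_in_allMarkers = []
--     for i, m in enumerate(allMarkers):
--         if m in feet:
--             markers.append(m)
--             idx_in_allMarkers.append(i)
--
--     return markers, idx_in_allMarkers
-- ===== Notes on version B (the rewrite author's own statement) =====
-- stated objective: idiomatic
-- what changed: Instead of building the feet name list and running allMarkers.index() once per feet marker, B makes a set of the suffixed feet names and does a single enumerate pass over allMarkers, collecting both the matching names and their indices in one accumulator loop.
import Mathlib
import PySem

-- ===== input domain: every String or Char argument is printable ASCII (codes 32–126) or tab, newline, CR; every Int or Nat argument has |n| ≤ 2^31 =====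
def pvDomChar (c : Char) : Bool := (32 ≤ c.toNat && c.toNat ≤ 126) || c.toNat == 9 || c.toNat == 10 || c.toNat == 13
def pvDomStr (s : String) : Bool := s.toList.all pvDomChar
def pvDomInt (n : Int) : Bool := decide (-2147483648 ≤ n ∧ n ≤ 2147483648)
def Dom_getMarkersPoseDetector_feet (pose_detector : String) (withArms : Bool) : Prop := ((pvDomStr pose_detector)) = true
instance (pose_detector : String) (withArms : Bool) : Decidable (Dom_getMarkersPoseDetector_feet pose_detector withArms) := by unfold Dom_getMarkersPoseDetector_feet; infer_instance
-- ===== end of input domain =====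

-- B drops A's per-feet-marker allMarkers.index() scans: it makes a set of the suffixed feet
-- names and collects both the matching names and their indices in ONE enumerate pass over
-- allMarkers (idiomatic; the feet occur there in the same order, so the result is identical).


-- ===== PORT A =====
-- helper getArmMarkersPoseDetector (shared module helper, used verbatim by both A and B)
def pvArmMarkers (pose_detector : String) : List String :=
  (["RElbow", "LElbow", "RWrist", "LWrist"]).map (fun m => m ++ "_" ++ pose_detector)

-- helper getMarkersPoseDetector (shared module helper, used verbatim by both A and B)
def pvAllMarkers (pose_detector : String) (withArms : Bool) : List String :=
  let markers := (["Neck", "RShoulder", "LShoulder", "RHip", "LHip", "midHip",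
      "RKnee", "LKnee", "RAnkle", "LAnkle", "RHeel", "LHeel",
      "RSmallToe", "LSmallToe", "RBigToe", "LBigToe", "RElbow",
      "LElbow", "RWrist", "LWrist"]).map (fun m => m ++ "_" ++ pose_detector)
  if !withArms then
    markers.filter (fun m => !(pvArmMarkers pose_detector).contains m)
  else markers

def getMarkersPoseDetector_feet (pose_detector : String) (withArms : Bool) : List String × List Int :=
  let markers := (["RAnkle", "LAnkle", "RHeel", "LHeel", "RSmallToe", "LSmallToe",
      "RBigToe", "LBigToe"]).map (fun m => m ++ "_" ++ pose_detector)
  let allMarkers := pvAllMarkers pose_detector withArms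
  -- allMarkers.index(marker): the .getD 0 default is unreachable — every feet marker occurs
  -- in allMarkers, so Python's .index never raises and A is total.
  let idx_in_allMarkers := markers.foldl
    (fun (acc : List Int) marker =>
      acc ++ [(((PySem.List.index? allMarkers marker).getD 0 : Nat) : Int)]) []
  (markers, idx_in_allMarkers)

-- ===== PORT B =====
def getMarkersPoseDetector_feet_alt (pose_detector : String) (withArms : Bool) : List String × List Int :=
  let feet : PySem.Set String := PySem.Set.ofList
    ((["RAnkle", "LAnkle", "RHeel", "LHeel", "RSmallToe", "LSmallToe",
      "RBigToe", "LBigToe"]).map (fun b => b ++ "_" ++ pose_detector))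
  (PySem.List.enumerate (pvAllMarkers pose_detector withArms)).foldl
    (fun (st : List String × List Int) im =>
      if PySem.Set.contains feet im.2 then (st.1 ++ [im.2], st.2 ++ [im.1]) else st)
    ([], [])

-- ===== PRECONDITION & SPEC =====
def Spec_getMarkersPoseDetector_feet (pose_detector : String) (withArms : Bool) (out : List String × List Int) : Prop := out = getMarkersPoseDetector_feet_alt pose_detector withArms
instance (pose_detector : String) (withArms : Bool) (out : List String × List Int) : Decidable (Spec_getMarkersPoseDetector_feet pose_detector withArms out) := by unfold Spec_getMarkersPoseDetector_feet; infer_instance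

-- ===== CLAIM (what is proved, stated in full; the proofs are below) =====
def Claim_equal_getMarkersPoseDetector_feet : Prop := ∀ (pose_detector : String) (withArms : Bool), Dom_getMarkersPoseDetector_feet pose_detector withArms → Spec_getMarkersPoseDetector_feet pose_detector withArms (getMarkersPoseDetector_feet pose_detector withArms)

-- ===== LEMMAS AND PROOFS =====

-- A's value in closed form
theorem pv_A_val (p : String) (w : Bool) :
    getMarkersPoseDetector_feet p w =
      ((["RAnkle", "LAnkle", "RHeel", "LHeel", "RSmallToe", "LSmallToe",
        "RBigToe", "LBigToe"]).map (fun m => m ++ "_" ++ p),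
       [8, 9, 10, 11, 12, 13, 14, 15]) := by
  cases w <;>
    · unfold getMarkersPoseDetector_feet pvAllMarkers pvArmMarkers
      set_option maxRecDepth 4000 in
      simp [PySem.List.index?_cons_self, PySem.List.index?_cons_of_ne,
        -PySem.List.index?_eq_idxOf?]

-- B's value in closed form
theorem pv_B_val (p : String) (w : Bool) :
    getMarkersPoseDetector_feet_alt p w =
      ((["RAnkle", "LAnkle", "RHeel", "LHeel", "RSmallToe", "LSmallToe",
        "RBigToe", "LBigToe"]).map (fun m => m ++ "_" ++ p),
       [8, 9, 10, 11, 12, 13, 14, 15]) := by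
  cases w <;>
    · unfold getMarkersPoseDetector_feet_alt pvAllMarkers pvArmMarkers
      set_option maxRecDepth 4000 in
      simp [PySem.Set.ofList, PySem.Set.add, PySem.Set.contains, PySem.List.enumerate]

-- ===== VERDICT (by name: the statement is the Claim_ definition above) =====
theorem getMarkersPoseDetector_feet_spec : Claim_equal_getMarkersPoseDetector_feet := by
  intro p w _
  unfold Spec_getMarkersPoseDetector_feet
  rw [pv_A_val, pv_B_val]
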